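-- pv_equiv track=rewrite | github.com/MelodicDrumstep/SJTU-CS3312-Computer-System-Security | Lab6_Decryption/riddle_man/present_cipher.py | round_function
-- ===== SOURCE A (Python) =====
-- s_box = (0xC, 0x5, 0x6, 0xB, 0x9, 0x0, 0xA, 0xD, 0x3, 0xE, 0xF, 0x8, 0x4, 0x7, 0x1, 0x2)
--
-- p_layer_order = [0, 16, 32, 48, 1, 17, 33, 49, 2, 18, 34, 50, 3, 19, 35, 51, 4, 20, 36, 52, 5, 21, 37, 53, 6, 22, 38,
-- 				 54, 7, 23, 39, 55, 8, 24, 40, 56, 9, 25, 41, 57, 10, 26, 42, 58, 11, 27, 43, 59, 12, 28, 44, 60, 13,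
-- 				 29, 45, 61, 14, 30, 46, 62, 15, 31, 47, 63]
--
-- block_size = 64
--
-- def round_function(state, key):
-- 	new_state = state ^ key
-- 	state_nibs = []
-- 	for x in range(0, block_size, 4):
-- 		nib = (new_state >> x) & 0xF
-- 		sb_nib = s_box[nib]
-- 		state_nibs.append(sb_nib)
--
-- 	state_bits = []
-- 	for y in state_nibs:
-- 		nib_bits = [1 if t == '1'else 0 for t in format(y, '04b')[::-1]]
-- 		state_bits += nib_bits
--
-- 	state_p_layer = [0 for _ in range(64)]
-- 	for p_index, std_bits in enumerate(state_bits):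
-- 		state_p_layer[p_layer_order[p_index]] = std_bits
--
-- 	round_output = 0
-- 	for index, ind_bit in enumerate(state_p_layer):
-- 		round_output += (ind_bit << index)
--
-- 	return round_output
-- ===== SOURCE B (Python) =====
-- s_box = (0xC, 0x5, 0x6, 0xB, 0x9, 0x0, 0xA, 0xD, 0x3, 0xE, 0xF, 0x8, 0x4, 0x7, 0x1, 0x2)
--
-- def round_function(state, key):
--     x = state ^ key
--     out = 0
--     for i in range(16):
--         sb = s_box[(x >> (4 * i)) & 0xF]
--         for b in range(4):
--             j = 4 * i + b
--             out += ((sb >> b) & 1) << (63 if j == 63 else 16 * j % 63)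
--     return out
-- ===== Notes on version B (the rewrite author's own statement) =====
-- stated objective: simpler
-- what changed: Replaced A's three intermediate list passes (nibble list, bit list, permuted 64-slot list) and the 64-entry p_layer_order table with a single fused loop over the 16 nibbles that S-boxes each nibble and adds each output bit directly into an integer accumulator at the closed-form PRESENT permutation position P(j) = 16*j % 63 (P(63) = 63).
import Mathlib
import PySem

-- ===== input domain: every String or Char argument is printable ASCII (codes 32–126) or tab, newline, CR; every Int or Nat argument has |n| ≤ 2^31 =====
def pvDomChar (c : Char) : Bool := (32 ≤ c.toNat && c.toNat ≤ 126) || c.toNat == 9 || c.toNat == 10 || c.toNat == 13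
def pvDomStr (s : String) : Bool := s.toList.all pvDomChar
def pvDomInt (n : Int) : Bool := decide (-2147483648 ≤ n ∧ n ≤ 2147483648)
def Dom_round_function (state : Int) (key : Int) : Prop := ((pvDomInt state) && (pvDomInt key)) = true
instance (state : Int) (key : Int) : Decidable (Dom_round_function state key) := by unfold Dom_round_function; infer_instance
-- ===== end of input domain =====

-- B fuses A's three list-building passes into one bit-placement pass over the 16 nibbles,
-- replacing the 64-entry permutation table with the closed form P(j) = 16*j % 63 (P(63) = 63);
-- objective: simpler.

-- ===== PORT A =====
-- the module constant s_box (a tuple of 16 small ints), shared by both Pythons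
def sBox : List Int := [0xC, 0x5, 0x6, 0xB, 0x9, 0x0, 0xA, 0xD, 0x3, 0xE, 0xF, 0x8, 0x4, 0x7, 0x1, 0x2]

def pLayerOrder : List Int := [0, 16, 32, 48, 1, 17, 33, 49, 2, 18, 34, 50, 3, 19, 35, 51, 4, 20, 36, 52, 5, 21, 37, 53, 6, 22, 38, 54, 7, 23, 39, 55, 8, 24, 40, 56, 9, 25, 41, 57, 10, 26, 42, 58, 11, 27, 43, 59, 12, 28, 44, 60, 13, 29, 45, 61, 14, 30, 46, 62, 15, 31, 47, 63]

-- [1 if t == '1' else 0 for t in format(y, '04b')[::-1]] : hand-ported, exact for 0 ≤ y < 16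
-- (y is always an s_box entry, i.e. 0..15, so format(y,'04b') is exactly the 4 bits MSB-first
-- and the reversed comprehension is the 4 bits LSB-first)
def nibBitsLSB (y : Int) : List Int :=
  [PySem.Int.band y 1, PySem.Int.band (y >>> 1) 1, PySem.Int.band (y >>> 2) 1, PySem.Int.band (y >>> 3) 1]

def round_function (state : Int) (key : Int) : Int :=
  let newState := PySem.Int.bxor state key
  -- for x in range(0, block_size, 4): nib = (new_state >> x) & 0xF; state_nibs.append(s_box[nib])
  -- (s_box[nib] never raises: nib = … & 0xF ∈ [0,16), so the pyGetD default never fires)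
  let stateNibs : List Int :=
    (PySem.List.pyRange 0 64 4).foldl (fun acc x =>
      let nib := PySem.Int.band (newState >>> x.toNat) 0xF
      let sbNib := PySem.List.pyGetD sBox nib 0
      acc ++ [sbNib]) []
  -- for y in state_nibs: state_bits += nib_bits
  let stateBits : List Int := stateNibs.foldl (fun acc y => acc ++ nibBitsLSB y) []
  -- state_p_layer = [0 for _ in range(64)]; state_p_layer[p_layer_order[p_index]] = std_bits
  -- (every table entry is in [0,64), so the list assignment never raises)
  let statePLayer : List Int :=
    (PySem.List.enumerate stateBits).foldl
      (fun l pb => l.set (PySem.List.pyGetD pLayerOrder pb.1 0).toNat pb.2)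
      (List.replicate 64 0)
  -- round_output += ind_bit << index
  (PySem.List.enumerate statePLayer).foldl (fun out ib => out + (ib.2 <<< ib.1.toNat)) 0

-- ===== PORT B =====
def round_function_alt (state : Int) (key : Int) : Int :=
  let x := PySem.Int.bxor state key
  (PySem.List.pyRange 0 16 1).foldl (fun out (i : Int) =>
    -- sb = s_box[(x >> (4*i)) & 0xF]  (index ∈ [0,16), so the pyGetD default never fires)
    let sb := PySem.List.pyGetD sBox (PySem.Int.band (x >>> (4 * i).toNat) 0xF) 0
    (PySem.List.pyRange 0 4 1).foldl (fun out (b : Int) =>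
      let j := 4 * i + b
      out + (PySem.Int.band (sb >>> b.toNat) 1 <<<
        (if j == 63 then (63 : Nat) else ((16 * j) % 63).toNat))) out) 0

-- ===== PRECONDITION & SPEC =====
def Spec_round_function (state : Int) (key : Int) (out : Int) : Prop := out = round_function_alt state key
instance (state : Int) (key : Int) (out : Int) : Decidable (Spec_round_function state key out) := by unfold Spec_round_function; infer_instance

-- ===== CLAIM (what is proved, stated in full; the proofs are below) =====
def Claim_equal_round_function : Prop := ∀ (state : Int) (key : Int), Dom_round_function state key → Spec_round_function state key (round_function state key)

-- ===== LEMMAS AND PROOFS =====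
lemma sr0 (x : Int) : x >>> (0 : Int) = x := by
  rw [show ((0 : Int)) = ((0 : Nat) : Int) from rfl, Int.shiftRight_natCast_right]
  simp

lemma r64 : PySem.List.pyRange 0 64 4 = [0, 4, 8, 12, 16, 20, 24, 28, 32, 36, 40, 44, 48, 52, 56, 60] := by decide
lemma r16 : PySem.List.pyRange 0 16 1 = [0, 1, 2, 3, 4, 5, 6, 7, 8, 9, 10, 11, 12, 13, 14, 15] := by decide
lemma r4 : PySem.List.pyRange 0 4 1 = [0, 1, 2, 3] := by decide

set_option maxHeartbeats 2000000 in
theorem round_function_eq (state key : Int) :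
    round_function state key = round_function_alt state key := by
  unfold round_function round_function_alt
  generalize PySem.Int.bxor state key = x
  rw [r64, r16, r4]
  simp only [List.foldl_cons, List.foldl_nil, nibBitsLSB, List.nil_append, List.cons_append]
  norm_num [PySem.List.enumerate_cons, PySem.List.enumerate_nil, List.replicate,
    pLayerOrder, PySem.List.pyGetD_ofNat']
  simp [sr0, ← Int.shiftRight_natCast_right]
  ring

-- ===== VERDICT (by name: the statement is the Claim_ definition above) =====
theorem round_function_spec : Claim_equal_round_function := by
  intro state key _
  unfold Spec_round_function
  exact round_function_eq state key
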